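-- pv_equiv track=rewrite | github.com/Shunta-Shimizu/AtCoder | ABC/297_a.py | solve
-- ===== SOURCE A (Python) =====
-- def gcd(a, b):
--     if b == 0:
--         return a
--     return gcd(b, a % b)
--
-- def solve(A, B):
--     if A == B:
--         return 0
--     elif A < B:
--         A, B = B, A
--
--     gcd_value = gcd(A, B)
--     if gcd_value != 1:
--         return -1
--
--     cnt = 0
--     while B > 0:
--         cnt += A // B
--         A, B = B, A % B
--     if A != 1:
--         return -1
--     return cnt
-- ===== SOURCE B (Python) =====
-- def solve(A, B):
--     if A == B:
--         return 0
--     if A < B: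
--         A, B = B, A
--
--     def rec(a, b):
--         # returns the sum of Euclidean quotients if the chain ends at gcd 1, else None
--         if b == 0:
--             return 0 if a == 1 else None
--         r = rec(b, a % b)
--         return None if r is None else a // b + r
--
--     r = rec(A, B)
--     return -1 if r is None else r
-- ===== Notes on version B (the rewrite author's own statement) =====
-- stated objective: simpler
-- what changed: One recursion over the Euclidean step carries both the quotient sum and the coprimality decision (None sentinel at the base), replacing A's separate recursive gcd pre-check plus imperative while-loop and final a==1 test.
import Mathlib
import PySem

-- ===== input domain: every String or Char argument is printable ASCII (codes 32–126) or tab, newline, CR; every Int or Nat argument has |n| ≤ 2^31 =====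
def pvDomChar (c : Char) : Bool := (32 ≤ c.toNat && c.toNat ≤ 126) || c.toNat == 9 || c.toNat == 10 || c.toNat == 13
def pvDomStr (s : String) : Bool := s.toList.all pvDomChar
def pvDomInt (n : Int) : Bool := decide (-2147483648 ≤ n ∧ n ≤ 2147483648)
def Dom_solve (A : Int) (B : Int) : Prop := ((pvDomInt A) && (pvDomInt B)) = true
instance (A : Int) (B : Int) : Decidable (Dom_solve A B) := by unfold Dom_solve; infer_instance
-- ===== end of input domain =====

-- B = one recursion over the Euclidean step carrying both the quotient sum and the
-- coprimality decision, instead of A's separate recursive gcd plus while-loop; same values everywhere.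

-- termination measure for every Euclidean recursion below (Python's % has the divisor's sign)
theorem pvMod_natAbs_lt (a b : Int) (hb : b ≠ 0) :
    (PySem.Int.mod a b).natAbs < b.natAbs := by
  rcases lt_or_gt_of_ne hb with h | h
  · have := PySem.Int.mod_neg_bounds a h
    omega
  · have h1 := PySem.Int.mod_nonneg a h
    have h2 := PySem.Int.mod_lt a h
    omega

-- ===== PORT A =====
def gcdA (a b : Int) : Int :=
  if h : b = 0 then a
  else gcdA b (PySem.Int.mod a b)
termination_by b.natAbs
decreasing_by exact pvMod_natAbs_lt a b h

def loopA (a b cnt : Int) : Int :=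
  if h : b > 0 then loopA b (PySem.Int.mod a b) (cnt + PySem.Int.floordiv a b)
  else if a ≠ 1 then -1 else cnt
termination_by b.natAbs
decreasing_by exact pvMod_natAbs_lt a b (by omega)

def solve (A : Int) (B : Int) : Int :=
  if A = B then 0
  else
    let p := if A < B then (B, A) else (A, B)
    let gcd_value := gcdA p.1 p.2
    if gcd_value ≠ 1 then -1
    else loopA p.1 p.2 0

-- ===== PORT B =====
def recB (a b : Int) : Option Int :=
  if h : b = 0 then (if a = 1 then some 0 else none)
  else (recB b (PySem.Int.mod a b)).map (fun r => PySem.Int.floordiv a b + r)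
termination_by b.natAbs
decreasing_by exact pvMod_natAbs_lt a b h

def solve_alt (A : Int) (B : Int) : Int :=
  if A = B then 0
  else
    let p := if A < B then (B, A) else (A, B)
    match recB p.1 p.2 with
    | none => -1
    | some r => r

-- ===== PRECONDITION & SPEC =====
def Spec_solve (A : Int) (B : Int) (out : Int) : Prop := out = solve_alt A B
instance (A : Int) (B : Int) (out : Int) : Decidable (Spec_solve A B out) := by unfold Spec_solve; infer_instance

-- ===== CLAIM (what is proved, stated in full; the proofs are below) =====
def Claim_equal_solve : Prop := ∀ (A : Int) (B : Int), Dom_solve A B → Spec_solve A B (solve A B)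

-- ===== LEMMAS AND PROOFS =====

-- a negative divisor keeps the whole Euclidean chain negative: no gcd 1, no recB value
theorem neg_chain (n : Nat) (a b : Int) (hb : b < 0) (hn : b.natAbs ≤ n) :
    gcdA a b < 0 ∧ recB a b = none := by
  induction n generalizing a b with
  | zero => omega
  | succ n ih =>
    have hb0 : b ≠ 0 := by omega
    rw [gcdA, recB]
    simp only [hb0, dite_false]
    set r := PySem.Int.mod a b with hr
    have hbnd := PySem.Int.mod_neg_bounds a hb
    by_cases hr0 : r = 0
    · rw [gcdA, recB]
      simp only [hr0, dite_true]
      constructor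
      · exact hb
      · simp; omega
    · have hlt := pvMod_natAbs_lt a b hb0
      have := ih b r (by omega) (by omega)
      exact ⟨this.1, by rw [this.2]; rfl⟩

-- for b ≥ 0: if gcdA a b = 1 then recB returns the quotient sum that loopA accumulates,
-- otherwise recB returns none
theorem pos_chain (n : Nat) (a b : Int) (hb : 0 ≤ b) (hn : b.natAbs ≤ n) :
    (gcdA a b = 1 → ∃ c, recB a b = some c ∧ ∀ cnt, loopA a b cnt = cnt + c) ∧
    (gcdA a b ≠ 1 → recB a b = none) := by
  induction n generalizing a b with
  | zero =>
    have hb0 : b = 0 := by omega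
    subst hb0
    rw [gcdA, recB]
    simp only [dite_true]
    constructor
    · intro ha
      refine ⟨0, by simp [ha], fun cnt => ?_⟩
      rw [loopA]; simp [ha]
    · intro ha; simp [ha]
  | succ n ih =>
    by_cases hb0 : b = 0
    · subst hb0
      rw [gcdA, recB]
      simp only [dite_true]
      constructor
      · intro ha
        refine ⟨0, by simp [ha], fun cnt => ?_⟩
        rw [loopA]; simp [ha]
      · intro ha; simp [ha]
    · have hbpos : 0 < b := by omega
      rw [gcdA, recB]
      simp only [hb0, dite_false]
      set r := PySem.Int.mod a b with hr
      have hrnn := PySem.Int.mod_nonneg a hbpos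
      have hlt := pvMod_natAbs_lt a b hb0
      have IH := ih b r hrnn (by omega)
      constructor
      · intro hg
        obtain ⟨c, hc, hloop⟩ := IH.1 hg
        refine ⟨PySem.Int.floordiv a b + c, by rw [hc]; rfl, fun cnt => ?_⟩
        rw [loopA]
        simp only [hbpos, dite_true]
        rw [hloop]; ring
      · intro hg
        rw [IH.2 hg]; rfl

theorem eq_on_pair (a b : Int) :
    (if gcdA a b ≠ 1 then (-1 : Int) else loopA a b 0) =
    (match recB a b with | none => (-1 : Int) | some r => r) := by
  rcases lt_or_ge b 0 with hb | hb
  · have h := neg_chain b.natAbs a b hb le_rfl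
    rw [h.2]
    simp only [if_pos (by omega : gcdA a b ≠ 1)]
  · have h := pos_chain b.natAbs a b hb le_rfl
    by_cases hg : gcdA a b = 1
    · obtain ⟨c, hc, hloop⟩ := h.1 hg
      rw [hc]
      simp [hg, hloop 0]
    · rw [h.2 hg]
      simp [hg]

-- ===== VERDICT (by name: the statement is the Claim_ definition above) =====
theorem solve_spec : Claim_equal_solve := by
  intro A B _
  unfold Spec_solve solve solve_alt
  by_cases hAB : A = B
  · simp [hAB]
  · simp only [hAB, if_false]
    exact eq_on_pair _ _
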